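-- pv_equiv track=rewrite | github.com/YurdanDev/StruktureDataLatihan3 | bin/Stack.py | searchStack
-- ===== SOURCE A (Python) =====
-- def searchStack(stack, item):
--     tempStack = []
--     count = 0
--
--     while len(stack) > 0:
--         current = stack.pop()
--         tempStack.append(current)
--         count += 1
--
--         if current == item:
--             while len(tempStack) > 0:
--                 stack.append(tempStack.pop())
--
--             return count
--
--     while len(tempStack) > 0:
--         stack.append(tempStack.pop())
--
--     return -1
-- ===== SOURCE B (Python) =====
-- def searchStack(stack, item):
--     rev = list(reversed(stack))
--     try:
--         return rev.index(item) + 1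
--     except ValueError:
--         return -1
-- ===== Notes on version B (the rewrite author's own statement) =====
-- stated objective: faster
-- what changed: B builds a reversed copy once and uses list.index instead of A's pop-into-temp-stack scan with two restore loops; the stack is never mutated.
import Mathlib
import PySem

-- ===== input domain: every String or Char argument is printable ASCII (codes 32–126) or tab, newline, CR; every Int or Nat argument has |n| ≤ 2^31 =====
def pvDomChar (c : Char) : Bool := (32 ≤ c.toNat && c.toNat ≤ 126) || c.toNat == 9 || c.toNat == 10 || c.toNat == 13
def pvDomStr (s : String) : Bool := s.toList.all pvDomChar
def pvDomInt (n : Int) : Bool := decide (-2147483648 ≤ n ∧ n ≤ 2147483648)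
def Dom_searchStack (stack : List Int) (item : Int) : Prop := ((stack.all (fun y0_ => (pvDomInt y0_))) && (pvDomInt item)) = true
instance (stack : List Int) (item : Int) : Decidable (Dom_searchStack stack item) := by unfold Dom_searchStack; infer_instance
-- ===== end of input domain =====

-- B replaces A's pop-into-temp-stack scan (with two restore loops) by a reversed copy plus list.index;
-- return values agree everywhere, and A restores the stack fully, so final state matches too.


-- ===== PORT A =====
-- A pops from the end of `stack`; modelled by recursing over `stack.reverse`,
-- carrying the tempStack and count exactly as the Python does.
def searchStackAuxA : List Int → List Int → Int → Int → Int
  | [], _, _, _ => -1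
  | current :: rest, tempStack, count, item =>
    let tempStack' := tempStack ++ [current]
    let count' := count + 1
    if current = item then count' else searchStackAuxA rest tempStack' count' item

def searchStack (stack : List Int) (item : Int) : Int :=
  searchStackAuxA stack.reverse [] 0 item

-- ===== PORT B =====
def searchStack_alt (stack : List Int) (item : Int) : Int :=
  let rev := stack.reverse
  match PySem.List.index? rev item with
  | some i => (i : Int) + 1
  | none => -1

-- ===== PRECONDITION & SPEC =====
def Spec_searchStack (stack : List Int) (item : Int) (out : Int) : Prop := out = searchStack_alt stack item
instance (stack : List Int) (item : Int) (out : Int) : Decidable (Spec_searchStack stack item out) := by unfold Spec_searchStack; infer_instance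

-- ===== CLAIM (what is proved, stated in full; the proofs are below) =====
def Claim_equal_searchStack : Prop := ∀ (stack : List Int) (item : Int), Dom_searchStack stack item → Spec_searchStack stack item (searchStack stack item)

-- ===== LEMMAS AND PROOFS =====
theorem searchStackAuxA_eq (rev : List Int) : ∀ (tempStack : List Int) (count item : Int),
    searchStackAuxA rev tempStack count item =
      match PySem.List.index? rev item with
      | some i => count + (i : Int) + 1
      | none => -1 := by
  induction rev with
  | nil => intro _ _ _; simp [searchStackAuxA, PySem.List.index?]
  | cons c rest ih =>
    intro tempStack count item
    by_cases h : c = item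
    · subst h
      have hc : PySem.List.index? (c :: rest) c = some 0 := PySem.List.index?_cons_self _ _
      rw [PySem.List.index?_eq_idxOf?] at hc
      simp [searchStackAuxA, hc]
    · have hc := PySem.List.index?_cons_of_ne (xs := rest) (v := item) h
      rw [PySem.List.index?_eq_idxOf?, PySem.List.index?_eq_idxOf?] at hc
      simp only [searchStackAuxA, if_neg h, ih, PySem.List.index?_eq_idxOf?, hc]
      cases hx : List.idxOf? item rest with
      | none => simp
      | some i => simp; ring

-- ===== VERDICT (by name: the statement is the Claim_ definition above) =====
theorem searchStack_spec : Claim_equal_searchStack := by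
  intro stack item _
  unfold Spec_searchStack searchStack searchStack_alt
  rw [searchStackAuxA_eq]
  simp only [PySem.List.index?_eq_idxOf?]
  cases hx : List.idxOf? item stack.reverse with
  | none => simp
  | some i => simp
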